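-- pv_equiv track=rewrite | github.com/pypi-data/pypi-mirror-383 | packages/acat/acat-2.0.1.tar.gz/acat-2.0.1/acat/utilities.py | bipartitions
-- ===== SOURCE A (Python) =====
-- from itertools import product, combinations
--
-- def bipartitions(shells, total):
--
--     n = len(shells)
--     for k in range(n + 1):
--         for combo in combinations(range(n), k):
--             if sum(len(shells[i]) for i in combo) == total:
--                 set_combo = set(combo)
--                 yield sorted(shells[i] for i in combo), sorted(
--                 shells[i] for i in range(n) if i not in set_combo)
-- ===== SOURCE B (Python) =====
-- def bipartitions(shells, total):
--     n = len(shells)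
--     lens = [len(s) for s in shells]
--     # reach[i] = set of (count, sum) pairs achievable by choosing a subset of shells[i:]
--     reach = [None] * (n + 1)
--     reach[n] = {(0, 0)}
--     for i in range(n - 1, -1, -1):
--         r = reach[i + 1]
--         reach[i] = r | {(c + 1, t + lens[i]) for (c, t) in r}
--
--     def dfs(i, need, acc, left, right):
--         if need == 0:
--             if acc == total:
--                 yield sorted(left), sorted(right + shells[i:])
--             return
--         if (need, total - acc) not in reach[i]:
--             return
--         s = shells[i]
--         yield from dfs(i + 1, need - 1, acc + lens[i], left + [s], right)
--         yield from dfs(i + 1, need, acc, left, right + [s])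
--
--     for k in range(n + 1):
--         yield from dfs(0, k, 0, [], [])
-- ===== Notes on version B (the rewrite author's own statement) =====
-- stated objective: faster
-- what changed: A scans every k-combination of indices, recomputing its length-sum and rebuilding the complement by a full-range membership scan per combination; B runs one DFS per k over the shells themselves, carrying the running length-sum and both partition halves, and prunes every branch from which no (count,sum)-reachable subset of the remaining shells can complete the target (an exact reachability table computed once).
import Mathlib
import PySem

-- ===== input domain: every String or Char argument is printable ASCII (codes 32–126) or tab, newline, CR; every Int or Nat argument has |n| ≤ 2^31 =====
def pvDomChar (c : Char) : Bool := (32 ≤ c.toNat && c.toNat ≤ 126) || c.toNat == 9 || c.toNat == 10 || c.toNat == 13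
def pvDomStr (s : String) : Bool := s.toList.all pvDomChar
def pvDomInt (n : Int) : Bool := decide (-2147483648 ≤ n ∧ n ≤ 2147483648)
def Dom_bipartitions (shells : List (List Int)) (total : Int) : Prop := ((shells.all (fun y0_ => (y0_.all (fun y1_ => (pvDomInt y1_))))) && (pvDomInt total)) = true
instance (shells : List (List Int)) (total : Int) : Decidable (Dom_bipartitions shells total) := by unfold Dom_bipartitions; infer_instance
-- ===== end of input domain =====

-- B replaces A's per-k scan of all index combinations (with the subset sum recomputed and the
-- complement rebuilt by a full-range scan for each combination) by a per-k DFS over the shells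
-- themselves that carries the running length-sum and both partition halves, pruning every branch
-- from which no subset of the remaining shells can complete the target sum (an exact (count,sum)
-- reachability table computed once); objective: faster.

-- ===== PORT A =====
-- itertools.combinations(range(n), k) = PySem.List.combinations (pyRange 0 n) k (CPython's order);
-- set_combo = set(combo) is inlined as PySem.Set.ofList combo (single use); shells[i] with i drawn
-- from range(n) is always in range, so pyGetD is exact here.
def bipartitions (shells : List (List Int)) (total : Int) : List (List (List Int) × List (List Int)) :=
  let n := shells.length
  (List.range (n + 1)).foldl (fun out k =>
    (PySem.List.combinations (PySem.List.pyRange 0 (n : Int)) k).foldl (fun out combo =>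
      if (combo.map (fun i => ((PySem.List.pyGetD shells i []).length : Int))).sum = total then
        out ++ [(PySem.List.sorted (combo.map (fun i => PySem.List.pyGetD shells i [])) (fun x => x) false,
                 PySem.List.sorted (((PySem.List.pyRange 0 (n : Int)).filter
                     (fun i => !(PySem.Set.contains (PySem.Set.ofList combo) i))).map
                   (fun i => PySem.List.pyGetD shells i [])) (fun x => x) false)]
      else out) out) []

-- ===== PORT B =====
-- reach[i] of Source B for the suffix shells[i:], computed structurally (same (count,sum) pairs)
def pvReach (rem : List (List Int)) : PySem.Set (Nat × Int) :=
  match rem with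
  | [] => PySem.Set.ofList [((0 : Nat), (0 : Int))]
  | s :: rest =>
      let r := pvReach rest
      PySem.Set.union r (PySem.Set.ofList (r.map (fun p => (p.1 + 1, p.2 + (s.length : Int)))))

-- dfs(i, need, acc, left, right) of Source B, with the suffix shells[i:] passed in place of the index i.
-- When need > 0 and the suffix is empty the reachability test is false, so the [] branch below the
-- test (Python's s = shells[i]) is never reached.
def pvDfs (total : Int) (rem : List (List Int)) (need : Nat) (acc : Int)
    (left right : List (List Int)) : List (List (List Int) × List (List Int)) :=
  match need with
  | 0 =>
      if acc = total then
        [(PySem.List.sorted left (fun x => x) false,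
          PySem.List.sorted (right ++ rem) (fun x => x) false)]
      else []
  | m + 1 =>
      if PySem.Set.contains (pvReach rem) (m + 1, total - acc) then
        match rem with
        | [] => []
        | s :: rest =>
            pvDfs total rest m (acc + (s.length : Int)) (left ++ [s]) right ++
            pvDfs total rest (m + 1) acc left (right ++ [s])
      else []

def bipartitions_alt (shells : List (List Int)) (total : Int) : List (List (List Int) × List (List Int)) :=
  (List.range (shells.length + 1)).flatMap (fun k => pvDfs total shells k 0 [] [])

-- ===== PRECONDITION & SPEC =====
def Spec_bipartitions (shells : List (List Int)) (total : Int) (out : List (List (List Int) × List (List Int))) : Prop := out = bipartitions_alt shells total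
instance (shells : List (List Int)) (total : Int) (out : List (List (List Int) × List (List Int))) : Decidable (Spec_bipartitions shells total out) := by unfold Spec_bipartitions; infer_instance

-- ===== CLAIM (what is proved, stated in full; the proofs are below) =====
def Claim_equal_bipartitions : Prop := ∀ (shells : List (List Int)) (total : Int), Dom_bipartitions shells total → Spec_bipartitions shells total (bipartitions shells total)

-- ===== LEMMAS AND PROOFS =====

-- all (chosen, not-chosen) splits of xs with |chosen| = k, chosen-first order (= per-k DFS order,
-- = the order of itertools.combinations once indices are replaced by the elements they select)
def pvPick {α : Type} : List α → Nat → List (List α × List α)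
  | [], 0 => [([], [])]
  | [], _ + 1 => []
  | x :: xs, 0 => (pvPick xs 0).map (fun p => (p.1, x :: p.2))
  | x :: xs, m + 1 =>
      (pvPick xs m).map (fun p => (x :: p.1, p.2)) ++ (pvPick xs (m + 1)).map (fun p => (p.1, x :: p.2))

def pvSumLen (l : List (List Int)) : Int := (l.map (fun s => (s.length : Int))).sum

def pvOut (total : Int) (p : List (List Int) × List (List Int)) :
    Option (List (List Int) × List (List Int)) :=
  if pvSumLen p.1 = total then
    some (PySem.List.sorted p.1 (fun x => x) false, PySem.List.sorted p.2 (fun x => x) false)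
  else none

lemma pvSumLen_cons (s : List Int) (l : List (List Int)) :
    pvSumLen (s :: l) = (s.length : Int) + pvSumLen l := by
  simp [pvSumLen]

lemma pvPick_zero {α : Type} : ∀ (l : List α), pvPick l 0 = [([], l)] := by
  intro l
  induction l with
  | nil => rfl
  | cons x xs ih => simp [pvPick, ih]

lemma pvReach_mem :
    ∀ (rem : List (List Int)) (need : Nat) (p : List (List Int) × List (List Int)),
      p ∈ pvPick rem need → (need, pvSumLen p.1) ∈ pvReach rem := by
  intro rem
  induction rem with
  | nil =>
      intro need p hp
      cases need with
      | zero =>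
          simp only [pvPick, List.mem_singleton] at hp
          subst hp
          simp [pvReach, PySem.Set.mem_ofList, pvSumLen]
      | succ m => simp [pvPick] at hp
  | cons s rest ih =>
      intro need p hp
      cases need with
      | zero =>
          rw [pvPick_zero] at hp
          simp only [List.mem_singleton] at hp
          subst hp
          have h0 : (0, pvSumLen ([] : List (List Int))) ∈ pvReach rest :=
            ih 0 ([], rest) (by rw [pvPick_zero]; simp)
          simp only [pvReach]
          rw [PySem.Set.mem_union]
          exact Or.inl h0
      | succ m =>
          simp only [pvPick, List.mem_append, List.mem_map] at hp
          simp only [pvReach]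
          rw [PySem.Set.mem_union]
          rcases hp with ⟨q, hq, rfl⟩ | ⟨q, hq, rfl⟩
          · right
            rw [PySem.Set.mem_ofList]
            refine List.mem_map.mpr ⟨(m, pvSumLen q.1), ih m q hq, ?_⟩
            simp [pvSumLen_cons]
            ring
          · exact Or.inl (ih (m + 1) q hq)

-- the DFS result, characterised: prune-free enumeration then filter
lemma pvDfs_eq (total : Int) :
    ∀ (rem : List (List Int)) (need : Nat) (acc : Int) (left right : List (List Int)),
      pvDfs total rem need acc left right =
        (pvPick rem need).filterMap (fun p =>
          if acc + pvSumLen p.1 = total then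
            some (PySem.List.sorted (left ++ p.1) (fun x => x) false,
                  PySem.List.sorted (right ++ p.2) (fun x => x) false)
          else none) := by
  intro rem
  induction rem with
  | nil =>
      intro need acc left right
      cases need with
      | zero =>
          rw [pvPick_zero]
          by_cases h : acc = total <;>
            simp [pvDfs, pvSumLen, h]
      | succ m =>
          have hc : ¬ ((m + 1, total - acc) ∈ pvReach []) := by
            simp [pvReach, PySem.Set.mem_ofList]
          have hcb : ¬ (PySem.Set.contains (pvReach []) (m + 1, total - acc) = true) :=
            fun h => hc ((PySem.Set.contains_iff _ _).mp h)
          rw [pvDfs]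
          rw [if_neg hcb]
          simp [pvPick]
  | cons s rest ih =>
      intro need acc left right
      cases need with
      | zero =>
          rw [pvPick_zero]
          by_cases h : acc = total <;>
            simp [pvDfs, pvSumLen, h]
      | succ m =>
          by_cases hc : PySem.Set.contains (pvReach (s :: rest)) (m + 1, total - acc) = true
          · have hl : pvDfs total (s :: rest) (m + 1) acc left right =
                pvDfs total rest m (acc + (s.length : Int)) (left ++ [s]) right ++
                  pvDfs total rest (m + 1) acc left (right ++ [s]) := by
              rw [pvDfs]
              rw [if_pos hc]
            rw [hl]
            have hrhs : pvPick (s :: rest) (m + 1) =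
                (pvPick rest m).map (fun p => (s :: p.1, p.2)) ++
                  (pvPick rest (m + 1)).map (fun p => (p.1, s :: p.2)) := rfl
            rw [hrhs, List.filterMap_append]
            congr 1
            · rw [ih, List.filterMap_map]
              refine List.filterMap_congr ?_
              intro p _
              have hsum : acc + (s.length : Int) + pvSumLen p.1 = acc + pvSumLen (s :: p.1) := by
                rw [pvSumLen_cons]; ring
              simp only [Function.comp, hsum]
              by_cases h : acc + pvSumLen (s :: p.1) = total <;>
                simp [h, List.append_assoc]
            · rw [ih, List.filterMap_map]
              refine List.filterMap_congr ?_
              intro p _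
              simp [Function.comp, List.append_assoc]
          · have hl : pvDfs total (s :: rest) (m + 1) acc left right = [] := by
              rw [pvDfs]
              rw [if_neg hc]
            rw [hl]
            symm
            rw [List.filterMap_eq_nil_iff]
            intro p hp
            by_cases h : acc + pvSumLen p.1 = total
            · exfalso
              have hmem := pvReach_mem (s :: rest) (m + 1) p hp
              have : pvSumLen p.1 = total - acc := by omega
              rw [this] at hmem
              exact hc ((PySem.Set.contains_iff _ _).mpr hmem)
            · simp [h]

lemma pvMem_combinations_range {off : Int} {b : Int} {k : Nat} {c : List Int}
    (hc : c ∈ PySem.List.combinations (PySem.List.pyRange off b) k) :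
    ∀ i ∈ c, off ≤ i ∧ i < b := by
  intro i hi
  have hsub := PySem.List.sublist_of_mem_combinations hc
  exact PySem.List.mem_pyRange_one.mp (hsub.mem hi)

lemma map_filter_eq_filterMap {α β : Type} (p : α → Bool) (f : α → β) (l : List α) :
    (l.filter p).map f = l.filterMap (fun a => if p a then some (f a) else none) := by
  induction l with
  | nil => rfl
  | cons x xs ih => by_cases h : p x <;> simp [h, ih]

-- the bridge: mapping each index combination of range(off, off+|xs|) to the pair
-- (selected shells, complement shells) yields exactly the DFS enumeration pvPick xs k
lemma pvBridge :
    ∀ (xs F : List (List Int)) (off : Nat), F.drop off = xs → ∀ k : Nat,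
      (PySem.List.combinations (PySem.List.pyRange (off : Int) ((off : Int) + xs.length)) k).map
        (fun c => (c.map (fun i => PySem.List.pyGetD F i []),
          ((PySem.List.pyRange (off : Int) ((off : Int) + xs.length)).filter
              (fun i => !(c.contains i))).map (fun i => PySem.List.pyGetD F i [])))
      = pvPick xs k := by
  intro xs
  induction xs with
  | nil =>
      intro F off _ k
      have hr : PySem.List.pyRange (off : Int) ((off : Int) + ([] : List (List Int)).length) = [] := by
        simp [PySem.List.pyRange]
      cases k with
      | zero => simp [hr, PySem.List.combinations_zero, pvPick]
      | succ m => simp [hr, PySem.List.combinations_nil_succ, pvPick]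
  | cons x xs' ih =>
      intro F off hdrop k
      have hlen : off < F.length := by
        by_contra hno
        have : F.drop off = [] := List.drop_eq_nil_of_le (by omega)
        rw [hdrop] at this; exact List.cons_ne_nil _ _ this
      have hx : PySem.List.pyGetD F (off : Int) [] = x := by
        rw [PySem.List.pyGetD_natCast, List.getD_eq_getElem _ _ hlen]
        have h0 : (F.drop off)[0]'(by rw [hdrop]; simp) = x := by
          simp [hdrop]
        rw [List.getElem_drop] at h0
        simpa using h0
      have hdrop' : F.drop (off + 1) = xs' := by
        have : F.drop (off + 1) = (F.drop off).drop 1 := by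
          rw [List.drop_drop]
        rw [this, hdrop, List.drop_one, List.tail_cons]
      have hcast : ((off : Int) + 1) = ((off + 1 : Nat) : Int) := by push_cast; ring
      have hr : PySem.List.pyRange (off : Int) ((off : Int) + (x :: xs').length) =
          (off : Int) :: PySem.List.pyRange ((off + 1 : Nat) : Int)
            (((off + 1 : Nat) : Int) + xs'.length) := by
        rw [PySem.List.pyRange_one_cons (by rw [List.length_cons]; push_cast; omega), hcast]
        congr 1
        rw [List.length_cons]
        push_cast
        ring
      rw [hr]
      -- abbreviations
      set R' := PySem.List.pyRange ((off + 1 : Nat) : Int) (((off + 1 : Nat) : Int) + xs'.length) with hR'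
      have hmemR' : ∀ i ∈ R', (off : Int) < i := by
        intro i hi
        have := PySem.List.mem_pyRange_one.mp hi
        have h1 : ((off + 1 : Nat) : Int) ≤ i := this.1
        push_cast at h1; omega
      cases k with
      | zero =>
          have hIH := ih F (off + 1) hdrop' 0
          rw [PySem.List.combinations_zero] at hIH ⊢
          simp only [List.map_cons, List.map_nil] at hIH ⊢
          have h0 : pvPick (x :: xs') 0 = (pvPick xs' 0).map (fun p => (p.1, x :: p.2)) := rfl
          rw [h0, ← hIH]
          simp only [List.filter_cons, List.map_cons, List.map_nil, List.contains_nil,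
            Bool.not_false, cond_true, hx]
          rw [hR']
          push_cast
          simp [hx]
      | succ m =>
          rw [PySem.List.combinations_cons_succ, List.map_append, List.map_map]
          have h1 : pvPick (x :: xs') (m + 1) =
              (pvPick xs' m).map (fun p => (x :: p.1, p.2)) ++
                (pvPick xs' (m + 1)).map (fun p => (p.1, x :: p.2)) := rfl
          rw [h1, ← ih F (off + 1) hdrop' m, ← ih F (off + 1) hdrop' (m + 1), List.map_map, List.map_map]
          congr 1
          · refine List.map_congr_left ?_
            intro c hc
            have hmem := pvMem_combinations_range hc
            simp only [Function.comp, Prod.mk.injEq]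
            constructor
            · simp [hx]
            · rw [List.filter_cons]
              have : ((off : Int) :: c).contains (off : Int) = true := by simp
              rw [this]
              simp only [Bool.not_true, cond_false]  -- drops off from the complement
              refine congrArg _ (List.filter_congr ?_)
              intro i hi
              have hne : i ≠ (off : Int) := by
                have := hmemR' i hi; omega
              simp [List.contains_cons, hne, Ne.symm hne]
          · refine List.map_congr_left ?_
            intro c hc
            have hmem := pvMem_combinations_range hc
            have hoffc : (off : Int) ∉ c := by
              intro habs
              have := (hmem _ habs).1
              push_cast at this; omega
            simp only [Function.comp, Prod.mk.injEq]
            constructor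
            · trivial
            · rw [List.filter_cons]
              have : c.contains (off : Int) = false := by
                simp [List.contains_iff_mem, hoffc]
              rw [this]
              simp only [Bool.not_false, hR']
              push_cast
              simp [hx]

-- A's inner loop over the combinations of one k, rewritten through the bridge
lemma pvInner (shells : List (List Int)) (total : Int) (k : Nat) (out : List (List (List Int) × List (List Int))) :
    (PySem.List.combinations (PySem.List.pyRange 0 (shells.length : Int)) k).foldl (fun out combo =>
      if (combo.map (fun i => ((PySem.List.pyGetD shells i []).length : Int))).sum = total then
        out ++ [(PySem.List.sorted (combo.map (fun i => PySem.List.pyGetD shells i [])) (fun x => x) false,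
                 PySem.List.sorted (((PySem.List.pyRange 0 (shells.length : Int)).filter
                     (fun i => !(PySem.Set.contains (PySem.Set.ofList combo) i))).map
                   (fun i => PySem.List.pyGetD shells i [])) (fun x => x) false)]
      else out) out
    = out ++ (pvPick shells k).filterMap (pvOut total) := by
  rw [PySem.List.foldl_append_ite
        (p := fun combo => (combo.map (fun i => ((PySem.List.pyGetD shells i []).length : Int))).sum = total)
        (f := fun combo =>
          (PySem.List.sorted (combo.map (fun i => PySem.List.pyGetD shells i [])) (fun x => x) false,
           PySem.List.sorted (((PySem.List.pyRange 0 (shells.length : Int)).filter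
               (fun i => !(PySem.Set.contains (PySem.Set.ofList combo) i))).map
             (fun i => PySem.List.pyGetD shells i [])) (fun x => x) false))]
  congr 1
  rw [map_filter_eq_filterMap]
  have hbr := pvBridge shells shells 0 (by simp) k
  simp only [Nat.cast_zero, zero_add] at hbr
  rw [← hbr, List.filterMap_map]
  refine List.filterMap_congr ?_
  intro c _
  simp only [Function.comp, pvOut, pvSumLen, List.map_map]
  have hset : ∀ i : Int, PySem.Set.contains (PySem.Set.ofList c) i = c.contains i := by
    intro i; simp [PySem.Set.contains]
  simp only [hset]
  simp [Function.comp_def]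

-- ===== VERDICT (by name: the statement is the Claim_ definition above) =====
theorem bipartitions_spec : Claim_equal_bipartitions := by
  intro shells total _
  show bipartitions shells total = bipartitions_alt shells total
  unfold bipartitions bipartitions_alt
  rw [PySem.List.foldl_congr_mem _ _
        (fun out k => out ++ (pvPick shells k).filterMap (pvOut total)) _
        (fun out k _ => pvInner shells total k out),
      PySem.List.foldl_append_eq_flatMap]
  simp only [List.nil_append]
  refine List.flatMap_congr ?_ 
  intro k _
  rw [pvDfs_eq]
  refine List.filterMap_congr ?_
  intro p _
  simp [pvOut]
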